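-- pv_equiv track=rewrite | github.com/skuggen-corax/challenges | 2021/hsctf/hopscotch.py | gen_hops
-- ===== SOURCE A (Python) =====
-- def gen_hops(n):
--     i = 0
--     hop_d = {}
--
--     while i <= n:
--         if i == 0:
--             hop_d[i] = 0
--         elif i == 1:
--             hop_d[i] = 1
--         elif i == 2:
--             hop_d[i] = 2
--         else:
--             hop_d[i] = hop_d[i-1] + hop_d[i-2]
--
--         i += 1
--
--     return hop_d
-- ===== SOURCE B (Python) =====
-- def _fib_pair(k):
--     # returns (F(k), F(k+1)) by fast doubling
--     if k == 0:
--         return (0, 1)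
--     a, b = _fib_pair(k // 2)
--     c = a * (2 * b - a)
--     d = a * a + b * b
--     if k % 2:
--         return (d, c + d)
--     return (c, d)
--
--
-- def gen_hops(n):
--     # hop(0) = 0 and hop(i) = F(i+1) for i >= 1, computed per key by fast doubling
--     return {i: (0 if i == 0 else _fib_pair(i + 1)[0]) for i in range(n + 1)}
-- ===== Notes on version B (the rewrite author's own statement) =====
-- stated objective: alternative
-- what changed: B replaces A's sequential DP over a growing dict (each value read back from the two previous dict entries) by a closed-form characterisation hop(i)=Fib(i+1) (hop(0)=0), computing each entry independently with recursive fast-doubling Fibonacci inside a dict comprehension.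
import Mathlib
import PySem

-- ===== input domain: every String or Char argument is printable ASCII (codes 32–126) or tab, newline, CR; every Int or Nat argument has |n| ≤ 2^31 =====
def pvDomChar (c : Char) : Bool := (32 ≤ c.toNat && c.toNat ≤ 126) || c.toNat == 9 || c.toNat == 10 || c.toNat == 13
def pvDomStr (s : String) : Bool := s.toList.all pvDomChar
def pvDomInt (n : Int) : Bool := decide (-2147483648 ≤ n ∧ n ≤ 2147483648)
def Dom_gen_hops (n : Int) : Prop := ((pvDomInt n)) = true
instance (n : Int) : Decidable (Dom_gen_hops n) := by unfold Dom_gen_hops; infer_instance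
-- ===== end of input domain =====

-- B replaces A's sequential DP (values re-read from the dict) by the closed form
-- hop(0)=0, hop(i)=Fib(i+1), computing each entry independently with fast-doubling
-- Fibonacci inside a dict comprehension (alternative algorithm, same return value).

-- ===== PORT A =====
-- A's while loop; fuel = number of iterations ((n+1).toNat).
-- hop_d[i-1]/hop_d[i-2] are ported as getD _ 0: keys 0..i-1 are always present,
-- so Python's raising lookup never raises and the default is never used.
def gen_hopsLoop : Nat → Int → PySem.Dict Int Int → PySem.Dict Int Int
  | 0, _, d => d
  | f + 1, i, d =>
      let d' :=
        if i = 0 then d.insert i 0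
        else if i = 1 then d.insert i 1
        else if i = 2 then d.insert i 2
        else d.insert i (d.getD (i - 1) 0 + d.getD (i - 2) 0)
      gen_hopsLoop f (i + 1) d'

def gen_hops (n : Int) : List (Int × Int) :=
  (gen_hopsLoop (n + 1).toNat 0 PySem.Dict.empty).items

-- ===== PORT B =====
-- _fib_pair(k) returns (F(k), F(k+1)) by fast doubling; it is only called with
-- k = i+1 ≥ 1, so the Nat argument (recursion on k/2, Python's k//2 for k ≥ 0) is exact.
def fibPair : Nat → Int × Int
  | 0 => (0, 1)
  | k + 1 =>
      let p := fibPair ((k + 1) / 2)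
      let a := p.1
      let b := p.2
      let c := a * (2 * b - a)
      let d := a * a + b * b
      if (k + 1) % 2 = 1 then (d, c + d) else (c, d)
decreasing_by exact Nat.div_lt_self (Nat.succ_pos k) (by omega)

-- dict comprehension over range(n+1): insert in iteration order into a fresh dict
def gen_hops_alt (n : Int) : List (Int × Int) :=
  ((PySem.List.pyRange 0 (n + 1) 1).foldl
      (fun d i => d.insert i (if i = 0 then 0 else (fibPair (i + 1).toNat).1))
      (PySem.Dict.empty : PySem.Dict Int Int)).items

-- ===== PRECONDITION & SPEC =====
def Spec_gen_hops (n : Int) (out : List (Int × Int)) : Prop := out = gen_hops_alt n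
instance (n : Int) (out : List (Int × Int)) : Decidable (Spec_gen_hops n out) := by unfold Spec_gen_hops; infer_instance

-- ===== CLAIM (what is proved, stated in full; the proofs are below) =====
def Claim_equal_gen_hops : Prop := ∀ (n : Int), Dom_gen_hops n → Spec_gen_hops n (gen_hops n)

-- ===== LEMMAS AND PROOFS =====

theorem fibPair_eq (k : Nat) : fibPair k = ((Nat.fib k : Int), (Nat.fib (k + 1) : Int)) := by
  induction k using Nat.strong_induction_on with
  | _ k ih =>
    match k with
    | 0 => simp [fibPair]
    | k + 1 =>
      have hlt : (k + 1) / 2 < k + 1 := Nat.div_lt_self (Nat.succ_pos k) (by omega)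
      rw [fibPair]
      rw [ih _ hlt]
      set m := (k + 1) / 2 with hm
      have hle : Nat.fib m ≤ 2 * Nat.fib (m + 1) :=
        le_trans Nat.fib_le_fib_succ (by omega)
      have hc : ((Nat.fib m : Int)) * (2 * (Nat.fib (m + 1) : Int) - (Nat.fib m : Int))
          = (Nat.fib (2 * m) : Int) := by
        rw [Nat.fib_two_mul]
        push_cast [hle]
        ring
      have hd : ((Nat.fib m : Int)) * (Nat.fib m : Int) + (Nat.fib (m + 1) : Int) * (Nat.fib (m + 1) : Int)
          = (Nat.fib (2 * m + 1) : Int) := by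
        rw [Nat.fib_two_mul_add_one]
        push_cast
        ring
      by_cases hpar : (k + 1) % 2 = 1
      · have hk : k + 1 = 2 * m + 1 := by omega
        simp only [hpar, if_pos]
        have hfib : (Nat.fib (2 * m) : Int) + (Nat.fib (2 * m + 1) : Int)
            = (Nat.fib (2 * m + 1 + 1) : Int) := by
          rw [show 2 * m + 1 + 1 = 2 * m + 2 from rfl, Nat.fib_add_two]
          push_cast; ring
        simp only [hc, hd, hk, hfib]
      · have hk : k + 1 = 2 * m := by omega
        simp only [if_neg hpar]
        rw [hk, ← hc, ← hd]

-- the common value: hop(0) = 0, hop(i) = F(i+1) otherwise (only used for i ≥ 0)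
def hopVal (i : Int) : Int := if i = 0 then 0 else (Nat.fib (i + 1).toNat : Int)

-- canonical insertion sequence both ports reduce to
def canon : Nat → Int → PySem.Dict Int Int → PySem.Dict Int Int
  | 0, _, d => d
  | f + 1, i, d => canon f (i + 1) (d.insert i (hopVal i))

theorem loopA_eq_canon (f : Nat) : ∀ (i : Int) (d : PySem.Dict Int Int),
    3 ≤ i → d.getD (i - 1) 0 = hopVal (i - 1) → d.getD (i - 2) 0 = hopVal (i - 2) →
    gen_hopsLoop f i d = canon f i d := by
  induction f with
  | zero => intro i d _ _ _; rfl
  | succ f ih =>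
    intro i d hi h1 h2
    have h0 : ¬ i = 0 := by omega
    have h1' : ¬ i = 1 := by omega
    have h2' : ¬ i = 2 := by omega
    have hval : d.getD (i - 1) 0 + d.getD (i - 2) 0 = hopVal i := by
      rw [h1, h2]
      simp only [hopVal, if_neg h0, if_neg (show ¬ i - 1 = 0 by omega),
        if_neg (show ¬ i - 2 = 0 by omega)]
      have e1 : (i - 1 + 1).toNat = (i - 2 + 1).toNat + 1 := by omega
      have e2 : (i + 1).toNat = (i - 2 + 1).toNat + 2 := by omega
      rw [e1, e2, Nat.fib_add_two]
      push_cast; ring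
    simp only [gen_hopsLoop, canon, if_neg h0, if_neg h1', if_neg h2', hval]
    apply ih
    · omega
    · rw [show i + 1 - 1 = i from by omega, PySem.Dict.getD_insert, if_pos rfl]
    · rw [show i + 1 - 2 = i - 1 from by omega, PySem.Dict.getD_insert,
        if_neg (by omega)]
      exact h1

theorem foldB_eq_canon (f : Nat) : ∀ (i : Int) (d : PySem.Dict Int Int), 0 ≤ i →
    (PySem.List.pyRange i (i + (f : Int)) 1).foldl
      (fun d j => d.insert j (if j = 0 then 0 else (fibPair (j + 1).toNat).1)) d
    = canon f i d := by
  induction f with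
  | zero => intro i d _; rw [PySem.List.pyRange_one_eq_nil (by omega)]; rfl
  | succ f ih =>
    intro i d hi
    rw [PySem.List.pyRange_one_cons (by push_cast; omega)]
    simp only [List.foldl_cons]
    have hv : (if i = 0 then 0 else (fibPair (i + 1).toNat).1) = hopVal i := by
      by_cases h : i = 0
      · simp [hopVal, h]
      · simp only [hopVal, if_neg h, fibPair_eq]
    rw [hv, show i + ((f : Nat) + 1 : Nat) = (i + 1) + (f : Int) from by push_cast; ring]
    exact ih (i + 1) _ (by omega)

theorem gen_hops_eq_alt (n : Int) : gen_hops n = gen_hops_alt n := by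
  rcases lt_or_ge n 0 with hneg | hpos
  · have hf : (n + 1).toNat = 0 := by omega
    rw [gen_hops, gen_hops_alt, hf, PySem.List.pyRange_one_eq_nil (by omega)]
    rfl
  · have hB : gen_hops_alt n = (canon (n + 1).toNat 0 PySem.Dict.empty).items := by
      rw [gen_hops_alt,
        show n + 1 = 0 + ((n + 1).toNat : Int) from by omega,
        foldB_eq_canon (n + 1).toNat 0 _ le_rfl]
      congr 2
      omega
    rcases lt_or_ge n 3 with hsm | hbig
    · have : n = 0 ∨ n = 1 ∨ n = 2 := by omega
      rw [hB]
      rcases this with h | h | h <;> subst h <;> decide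
    · have hf : (n + 1).toNat = (n - 2).toNat + 3 := by omega
      rw [gen_hops, hB, hf]
      show (gen_hopsLoop ((n-2).toNat + 2 + 1) 0 _).items = (canon ((n-2).toNat + 2 + 1) 0 _).items
      simp only [gen_hopsLoop, canon, if_pos]
      norm_num
      rw [loopA_eq_canon (n - 2).toNat 3 _ (by omega) (by decide) (by decide)]
      congr 1

-- ===== VERDICT (by name: the statement is the Claim_ definition above) =====
theorem gen_hops_spec : Claim_equal_gen_hops := by
  intro n _
  unfold Spec_gen_hops
  exact gen_hops_eq_alt n
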